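-- pv_equiv track=rewrite | github.com/NeuroMita/NeuroMitaPromptEditor | syntax/syntax_checker.py | _split_into_logical_lines
-- ===== SOURCE A (Python) =====
-- class SyntaxError:
--     def __init__(self, message: str, line_num: int, line_content: str, error_type: str = "Syntax"):
--         self.message = message
--         self.line_num = line_num
--         self.line_content = line_content
--         self.error_type = error_type
--
--     def __str__(self):
--         return f"[{self.error_type} Error] Line {self.line_num}: '{self.line_content.strip()}' - {self.message}"
--
-- def _split_into_logical_lines(script_text: str) -> list[str]:
--     logical_lines: list[str] = []
--     buff: list[str] = []
--     inside_triple = False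
--     i = 0
--     text = script_text
--     n = len(text)
--     triple = '"""'
--
--     while i < n:
--         if text.startswith(triple, i):
--             buff.append(triple)
--             inside_triple = not inside_triple
--             i += 3
--             continue
--
--         ch = text[i]
--
--         if ch == '\n' and not inside_triple:
--             logical_lines.append(''.join(buff))
--             buff.clear()
--             i += 1
--             continue
--
--         buff.append(ch)
--         i += 1
--
--     if buff:
--         logical_lines.append(''.join(buff))
--
--     if inside_triple:
--         raise SyntaxError('Unterminated multiline block (""" not closed)', 0, script_text) # Line 0 for file-level error
--
--     return logical_lines
-- ===== SOURCE B (Python) =====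
-- class SyntaxError:
--     def __init__(self, message: str, line_num: int, line_content: str, error_type: str = "Syntax"):
--         self.message = message
--         self.line_num = line_num
--         self.line_content = line_content
--         self.error_type = error_type
--
--     def __str__(self):
--         return f"[{self.error_type} Error] Line {self.line_num}: '{self.line_content.strip()}' - {self.message}"
--
-- def _split_into_logical_lines(script_text: str) -> list[str]:
--     # line-oriented: split once on '\n', track triple-quote parity per physical line
--     lines = script_text.split('\n')
--     out: list[str] = []
--     acc: list[str] = []
--     inside = False
--     for line in lines[:-1]:
--         acc.append(line)
--         if line.count('"""') % 2 == 1: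
--             inside = not inside
--         if not inside:
--             out.append('\n'.join(acc))
--             acc = []
--     acc.append(lines[-1])
--     if lines[-1].count('"""') % 2 == 1:
--         inside = not inside
--     if inside:
--         raise SyntaxError('Unterminated multiline block (""" not closed)', 0, script_text) # Line 0 for file-level error
--     tail = '\n'.join(acc)
--     if tail:
--         out.append(tail)
--     return out
-- ===== Notes on version B (the rewrite author's own statement) =====
-- stated objective: alternative
-- what changed: Replaces A's character-by-character scan (manual index, startswith at each position, char buffer) by a line-oriented pass: split once on '\n', then fold over physical lines flipping an inside flag by the parity of line.count('"""') and joining accumulated lines at each top-level boundary.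
import Mathlib
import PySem

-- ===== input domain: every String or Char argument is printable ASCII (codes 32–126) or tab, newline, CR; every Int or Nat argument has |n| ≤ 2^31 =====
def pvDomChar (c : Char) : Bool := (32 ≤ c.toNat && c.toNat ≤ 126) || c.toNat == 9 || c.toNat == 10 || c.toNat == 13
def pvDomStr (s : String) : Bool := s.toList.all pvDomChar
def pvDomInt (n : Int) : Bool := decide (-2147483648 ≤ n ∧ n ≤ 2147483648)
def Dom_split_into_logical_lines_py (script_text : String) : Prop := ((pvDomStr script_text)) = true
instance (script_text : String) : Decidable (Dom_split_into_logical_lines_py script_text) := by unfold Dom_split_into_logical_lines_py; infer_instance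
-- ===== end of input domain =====

-- B replaces A's character-by-character scan by a line-oriented pass (split on '\n',
-- per-line triple-quote parity); same cost, different decomposition.


-- ===== PORT A =====
-- A's while loop: at index i, startswith '"""' → buffer the three quotes and flip the flag;
-- '\n' at top level → emit ''.join(buff); otherwise buffer the char.  On the unterminated
-- case the Python raises after building the list; the port returns it (Pre_ excludes that).
def pvScanA : List Char → List Char → Bool → List String
  | [], buff, _ => if buff.isEmpty then [] else [String.ofList buff]
  | c :: rest, buff, inside =>
    if PySem.Chars.startswith (c :: rest) ['\"', '\"', '\"'] then
      pvScanA ((c :: rest).drop 3) (buff ++ ['\"', '\"', '\"']) (!inside)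
    else if c = '\n' ∧ inside = false then
      String.ofList buff :: pvScanA rest [] false
    else
      pvScanA rest (buff ++ [c]) inside
  termination_by cs _ _ => cs.length
  decreasing_by
    all_goals simp [List.length_drop]

def split_into_logical_lines_py (script_text : String) : List String :=
  pvScanA script_text.toList [] false

-- ===== PORT B =====
-- Source B: lines = script_text.split('\n'); loop over lines[:-1] with state (out, acc, inside),
-- flipping inside by the parity of line.count('"""'); then the last line and the tail.
-- Source B's raise on a still-open block (excluded by Pre_) is dropped: the port returns the list.
def pvFlip (inside : Bool) (line : String) : Bool :=
  if PySem.Str.count line "\"\"\"" % 2 = 1 then !inside else inside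

def pvStepB (st : List String × List String × Bool) (line : String) :
    List String × List String × Bool :=
  let acc := st.2.1 ++ [line]
  let inside := pvFlip st.2.2 line
  if inside then (st.1, acc, inside) else (st.1 ++ [PySem.Str.join "\n" acc], [], inside)

def split_into_logical_lines_py_alt (script_text : String) : List String :=
  let lines := (PySem.Str.split? script_text "\n").getD []
  let st := lines.dropLast.foldl pvStepB ([], [], false)
  let tail := PySem.Str.join "\n" (st.2.1 ++ [lines.getLastD ""])
  st.1 ++ (if tail = "" then [] else [tail])

-- ===== PRECONDITION & SPEC =====
-- Pre_ excludes exactly the inputs with an odd number of (greedy, non-overlapping) '"""'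
-- occurrences: there the Python A raises ('Unterminated multiline block').
def Pre_split_into_logical_lines_py (script_text : String) : Prop :=
  PySem.Str.count script_text "\"\"\"" % 2 = 0
instance (script_text : String) : Decidable (Pre_split_into_logical_lines_py script_text) := by
  unfold Pre_split_into_logical_lines_py; infer_instance

def pvWitness_split_into_logical_lines_py : String := "a = \"\"\"x\ny\"\"\"\nb = 1"

def Spec_split_into_logical_lines_py (script_text : String) (out : List String) : Prop :=
  out = split_into_logical_lines_py_alt script_text
instance (script_text : String) (out : List String) :
    Decidable (Spec_split_into_logical_lines_py script_text out) := by
  unfold Spec_split_into_logical_lines_py; infer_instance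

-- ===== CLAIM (what is proved, stated in full; the proofs are below) =====
def Claim_equal_split_into_logical_lines_py : Prop :=
  ∀ (script_text : String), Dom_split_into_logical_lines_py script_text →
    Pre_split_into_logical_lines_py script_text →
    Spec_split_into_logical_lines_py script_text (split_into_logical_lines_py script_text)

-- ===== LEMMAS AND PROOFS =====

-- greedy non-overlapping count of '"""', in the shape of A's scan / of Chars.count.go
def pvGcnt : List Char → Nat
  | [] => 0
  | c :: rest =>
    if PySem.Chars.startswith (c :: rest) ['\"', '\"', '\"'] then
      pvGcnt ((c :: rest).drop 3) + 1
    else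
      pvGcnt rest
  termination_by cs => cs.length
  decreasing_by
    all_goals simp [List.length_drop]

-- structural version of str.split('\n')
def pvSplit : List Char → List (List Char)
  | [] => [[]]
  | c :: r =>
    if c = '\n' then [] :: pvSplit r
    else
      match pvSplit r with
      | [] => [[c]]
      | p :: ps => (c :: p) :: ps

-- buffer contents of A's scan at the start of a physical line, given B's pending lines
def pvBf : List (List Char) → List Char
  | [] => []
  | a :: as => PySem.Chars.join ['\n'] (a :: as) ++ ['\n']

theorem pvSplit_ne_nil (cs : List Char) : pvSplit cs ≠ [] := by
  induction cs with
  | nil => simp [pvSplit]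
  | cons c r ih =>
    simp only [pvSplit]
    split
    · simp
    · rcases h : pvSplit r with _ | ⟨p, ps⟩ <;> simp

theorem pvSplit_no_newline (cs : List Char) : ∀ p ∈ pvSplit cs, '\n' ∉ p := by
  induction cs with
  | nil => simp [pvSplit]
  | cons c r ih =>
    intro p hp
    simp only [pvSplit] at hp
    by_cases hc : c = '\n'
    · rw [if_pos hc] at hp
      rcases List.mem_cons.mp hp with h | h
      · simp [h]
      · exact ih p h
    · rw [if_neg hc] at hp
      rcases hsp : pvSplit r with _ | ⟨p0, ps⟩
      · exact absurd hsp (pvSplit_ne_nil r)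
      · rw [hsp] at hp
        rcases List.mem_cons.mp hp with h | h
        · subst h
          intro hm
          rcases List.mem_cons.mp hm with h' | h'
          · exact hc h'.symm
          · exact ih p0 (by rw [hsp]; exact List.mem_cons_self ..) h'
        · exact ih p (by rw [hsp]; exact List.mem_cons_of_mem _ h)

theorem pvJoin_pvSplit (cs : List Char) :
    PySem.Chars.join ['\n'] (pvSplit cs) = cs := by
  induction cs with
  | nil => simp [pvSplit, PySem.Chars.join_singleton]
  | cons c r ih =>
    simp only [pvSplit]
    split
    · rename_i hc
      subst hc
      rcases h : pvSplit r with _ | ⟨p, ps⟩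
      · exact absurd h (pvSplit_ne_nil r)
      · rw [h] at ih
        rw [PySem.Chars.join_cons_cons]
        simp [ih]
    · rcases h : pvSplit r with _ | ⟨p, ps⟩
      · exact absurd h (pvSplit_ne_nil r)
      · rw [h] at ih
        rcases ps with _ | ⟨q, qs⟩
        · rw [PySem.Chars.join_singleton] at ih ⊢; simp [ih]
        · rw [PySem.Chars.join_cons_cons] at ih ⊢
          simp only [List.cons_append, List.append_assoc] at ih ⊢
          rw [ih]

theorem pvSplitOn_go (l : List Char) : ∀ (fuel : Nat) (cur : List Char)
    (acc : List (List Char)), l.length ≤ fuel →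
    PySem.Chars.splitOn.go ['\n'] fuel l cur acc =
      acc.reverse ++
        (match pvSplit l with
         | [] => [cur.reverse]
         | p :: ps => (cur.reverse ++ p) :: ps) := by
  induction l with
  | nil =>
    intro fuel cur acc _
    cases fuel <;> simp [PySem.Chars.splitOn.go, pvSplit]
  | cons c rest ih =>
    intro fuel cur acc hf
    cases fuel with
    | zero => simp at hf
    | succ f =>
      rw [PySem.Chars.splitOn.go]
      by_cases hc : c = '\n'
      · subst hc
        have hpre : List.isPrefixOf ['\n'] ('\n' :: rest) = true := by
          simp [List.isPrefixOf]
        rw [if_pos hpre]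
        have hd : List.drop (['\n'] : List Char).length ('\n' :: rest) = rest := by simp
        rw [hd]
        have := ih f [] (cur.reverse :: acc) (by
          have := hf; simp only [List.length_cons] at this; omega)
        rw [this]
        rcases h : pvSplit rest with _ | ⟨p, ps⟩
        · exact absurd h (pvSplit_ne_nil rest)
        · simp [pvSplit, h]
      · have hpre : List.isPrefixOf ['\n'] (c :: rest) = false := by
          simp [List.isPrefixOf]
          intro h; exact absurd h.symm hc
        rw [if_neg (by simp [hpre])]
        have := ih f (c :: cur) acc (Nat.le_of_succ_le_succ hf)
        rw [this]
        rcases h : pvSplit rest with _ | ⟨p, ps⟩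
        · exact absurd h (pvSplit_ne_nil rest)
        · simp [pvSplit, hc, h]

theorem pvSplitOn_eq (cs : List Char) :
    PySem.Chars.splitOn cs ['\n'] = pvSplit cs := by
  rw [PySem.Chars.splitOn, pvSplitOn_go cs (cs.length + 1) [] [] (Nat.le_succ _)]
  rcases h : pvSplit cs with _ | ⟨p, ps⟩
  · exact absurd h (pvSplit_ne_nil cs)
  · simp

theorem pvCount_go (fuel : Nat) : ∀ (l : List Char) (acc : Nat), l.length ≤ fuel →
    PySem.Chars.count.go ['\"', '\"', '\"'] fuel l acc = acc + pvGcnt l := by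
  induction fuel with
  | zero =>
    intro l acc hl
    have : l = [] := by cases l <;> simp_all
    subst this
    simp [PySem.Chars.count.go, pvGcnt]
  | succ f ih =>
    intro l acc hl
    cases l with
    | nil => simp [PySem.Chars.count.go, pvGcnt]
    | cons c rest =>
      rw [PySem.Chars.count.go]
      by_cases hp : List.isPrefixOf ['\"', '\"', '\"'] (c :: rest) = true
      · rw [if_pos hp]
        have hsub : (['\"', '\"', '\"'] : List Char).length = 3 := rfl
        rw [hsub]
        have hlen : ((c :: rest).drop 3).length ≤ f := by
          simp only [List.length_drop, List.length_cons] at *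
          omega
        rw [ih _ (acc + 1) hlen]
        rw [pvGcnt, if_pos (by simpa [PySem.Chars.startswith] using hp)]
        omega
      · rw [if_neg hp]
        rw [ih rest acc (by simp only [List.length_cons] at hl; omega)]
        rw [pvGcnt, if_neg (by simpa [PySem.Chars.startswith] using hp)]

theorem pvCount_eq (cs : List Char) :
    PySem.Chars.count cs ['\"', '\"', '\"'] = pvGcnt cs := by
  rw [PySem.Chars.count]
  rw [if_neg (by simp)]
  simpa using pvCount_go cs.length cs 0 (le_refl _)

-- a failed '"""' match at a line start stays failed when the '\n'-terminated tail is appended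
theorem pvNoTriple (c : Char) (r rest : List Char)
    (h : PySem.Chars.startswith (c :: r) ['\"', '\"', '\"'] = false) :
    PySem.Chars.startswith (c :: (r ++ '\n' :: rest)) ['\"', '\"', '\"'] = false := by
  match r with
  | [] =>
    simp [PySem.Chars.startswith, List.isPrefixOf, show ('\"' == '\n') = false from by decide]
  | [d] =>
    simp [PySem.Chars.startswith, List.isPrefixOf, show ('\"' == '\n') = false from by decide]
  | d :: e :: r3 =>
    simp only [PySem.Chars.startswith, List.isPrefixOf, List.cons_append] at h ⊢
    simpa using (by simpa using h)

-- A's scan of a newline-free suffix: everything is buffered, then flushed at the end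
theorem pvScanA_noNL (n : Nat) : ∀ (ls : List Char), ls.length ≤ n → '\n' ∉ ls →
    ∀ (buff : List Char) (inside : Bool),
    pvScanA ls buff inside =
      if (buff ++ ls).isEmpty then [] else [String.ofList (buff ++ ls)] := by
  induction n with
  | zero =>
    intro ls hl _ buff inside
    have : ls = [] := by cases ls <;> simp_all
    subst this
    simp [pvScanA]
  | succ n ih =>
    intro ls hl hnl buff inside
    cases ls with
    | nil => simp [pvScanA]
    | cons c rest =>
      rw [pvScanA]
      by_cases hs : PySem.Chars.startswith (c :: rest) ['\"', '\"', '\"'] = true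
      · rw [if_pos hs]
        obtain ⟨t, ht⟩ := (PySem.Chars.startswith_iff _ _).mp hs
        have htl : (c :: rest).drop 3 = t := by rw [← ht]; simp
        have hlen : t.length ≤ n := by
          have := congrArg List.length ht
          simp at this
          simp at hl
          omega
        have hnt : '\n' ∉ t := by
          intro hm
          exact hnl (by rw [← ht]; simp [hm])
        rw [htl, ih t hlen hnt]
        have : buff ++ ['\"', '\"', '\"'] ++ t = buff ++ (c :: rest) := by
          rw [← ht]; simp
        rw [this]
      · rw [if_neg hs]
        have hc : ¬(c = '\n' ∧ inside = false) := by
          intro hx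
          exact hnl (hx.1 ▸ List.mem_cons_self ..)
        rw [if_neg hc]
        have hnr : '\n' ∉ rest := fun hm => hnl (List.mem_cons_of_mem _ hm)
        have hcn : c ≠ '\n' := fun hx => hnl (hx ▸ List.mem_cons_self ..)
        rw [ih rest (by simp at hl; omega) hnr (buff ++ [c]) inside]
        simp

-- A's scan of one newline-terminated physical line
theorem pvScanA_line (n : Nat) : ∀ (ls : List Char), ls.length ≤ n → '\n' ∉ ls →
    ∀ (rest buff : List Char) (inside : Bool),
    pvScanA (ls ++ '\n' :: rest) buff inside =
      if (if pvGcnt ls % 2 = 1 then !inside else inside) then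
        pvScanA rest (buff ++ ls ++ ['\n']) true
      else
        String.ofList (buff ++ ls) :: pvScanA rest [] false := by
  induction n with
  | zero =>
    intro ls hl _ rest buff inside
    have : ls = [] := by cases ls <;> simp_all
    subst this
    rw [List.nil_append, pvScanA]
    rw [if_neg (by simp [PySem.Chars.startswith, List.isPrefixOf,
      show ('\"' == '\n') = false from by decide])]
    cases inside with
    | false => simp [pvGcnt]
    | true =>
      rw [if_neg (by simp)]
      simp [pvGcnt]
  | succ n ih =>
    intro ls hl hnl rest buff inside
    cases ls with
    | nil =>
      rw [List.nil_append, pvScanA]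
      rw [if_neg (by simp [PySem.Chars.startswith, List.isPrefixOf,
        show ('\"' == '\n') = false from by decide])]
      cases inside <;> simp [pvGcnt]
    | cons c r =>
      by_cases hs : PySem.Chars.startswith (c :: r) ['\"', '\"', '\"'] = true
      · obtain ⟨t, ht⟩ := (PySem.Chars.startswith_iff _ _).mp hs
        have hform : (c :: r) ++ '\n' :: rest =
            '\"' :: '\"' :: '\"' :: (t ++ '\n' :: rest) := by
          rw [← ht]; simp
        rw [hform, pvScanA]
        rw [if_pos (by
          apply (PySem.Chars.startswith_iff _ _).mpr
          exact ⟨t ++ '\n' :: rest, by simp⟩)]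
        have hlen : t.length ≤ n := by
          have := congrArg List.length ht
          simp at this
          simp at hl
          omega
        have hnt : '\n' ∉ t := by
          intro hm
          exact hnl (by rw [← ht]; simp [hm])
        simp only [List.drop_succ_cons, List.drop_zero]
        rw [ih t hlen hnt rest (buff ++ ['\"', '\"', '\"']) (!inside)]
        have hg : pvGcnt (c :: r) = pvGcnt t + 1 := by
          rw [pvGcnt, if_pos hs]
          congr 1
          rw [← ht]
          simp
        have hcond : (if pvGcnt t % 2 = 1 then !(!inside) else !inside) =
            (if pvGcnt (c :: r) % 2 = 1 then !inside else inside) := by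
          rw [hg]
          rcases Nat.mod_two_eq_zero_or_one (pvGcnt t) with h2 | h2 <;>
            simp [Nat.add_mod, h2]
        rw [hcond]
        have hbuf : buff ++ ['\"', '\"', '\"'] ++ t = buff ++ (c :: r) := by
          rw [← ht]; simp
        rw [List.append_assoc buff, ← List.append_assoc buff, hbuf]
      · have hs' : PySem.Chars.startswith (c :: r) ['\"', '\"', '\"'] = false := by
          simpa using hs
        rw [List.cons_append, pvScanA]
        rw [if_neg (by simp [pvNoTriple c r rest hs'])]
        have hcn : c ≠ '\n' := fun hx => hnl (hx ▸ List.mem_cons_self ..)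
        rw [if_neg (by intro hx; exact hcn hx.1)]
        have hnr : '\n' ∉ r := fun hm => hnl (List.mem_cons_of_mem _ hm)
        rw [ih r (by simp at hl; omega) hnr rest (buff ++ [c]) inside]
        have hg : pvGcnt (c :: r) = pvGcnt r := by
          rw [pvGcnt, if_neg (by simp [hs'])]
        rw [hg]
        simp [List.append_assoc]

theorem pvJoin_snoc (acc : List (List Char)) (x : List Char) :
    PySem.Chars.join ['\n'] (acc ++ [x]) = pvBf acc ++ x := by
  induction acc with
  | nil => simp [pvBf, PySem.Chars.join_singleton]
  | cons a as ih =>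
    cases as with
    | nil =>
      simp only [List.cons_append, List.nil_append, PySem.Chars.join_cons_cons,
        PySem.Chars.join_singleton, pvBf]
    | cons b bs =>
      simp only [List.cons_append, PySem.Chars.join_cons_cons, pvBf] at ih ⊢
      rw [ih]
      simp

theorem pvBf_snoc (acc : List (List Char)) (l : List Char) :
    pvBf (acc ++ [l]) = pvBf acc ++ l ++ ['\n'] := by
  cases acc with
  | nil => simp [pvBf, PySem.Chars.join_singleton]
  | cons a as =>
    have : (a :: as) ++ [l] = a :: (as ++ [l]) := by simp
    rw [this]
    show PySem.Chars.join ['\n'] (a :: (as ++ [l])) ++ ['\n'] = _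
    have := pvJoin_snoc (a :: as) l
    simp only [List.cons_append] at this
    rw [this]

theorem pvJoinStr (acc : List (List Char)) (x : List Char) :
    PySem.Str.join "\n" (acc.map String.ofList ++ [String.ofList x]) =
      String.ofList (pvBf acc ++ x) := by
  rw [PySem.Str.join]
  congr 1
  rw [show ("\n".toList) = ['\n'] from by decide]
  rw [show (List.map String.toList (acc.map String.ofList ++ [String.ofList x])) = acc ++ [x] by
    simp [List.map_map, Function.comp_def, String.toList_ofList]]
  exact pvJoin_snoc acc x

theorem pvFlip_ofList (i : Bool) (p : List Char) :
    pvFlip i (String.ofList p) = if pvGcnt p % 2 = 1 then !i else i := by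
  rw [pvFlip, PySem.Str.count, String.toList_ofList,
    show ("\"\"\"".toList) = ['\"', '\"', '\"'] from by decide, pvCount_eq]

theorem pvGetLastD_cons {α : Type} (a : α) (xs : List α) (d : α) (h : xs ≠ []) :
    (a :: xs).getLastD d = xs.getLastD d := by
  cases xs with
  | nil => exact absurd rfl h
  | cons b bs => simp

-- main invariant: A's scan of the remaining lines = B's fold over them
theorem pvMain : ∀ (lines : List (List Char)), lines ≠ [] → (∀ p ∈ lines, '\n' ∉ p) →
    ∀ (out : List String) (acc : List (List Char)) (inside : Bool),
    out ++ pvScanA (PySem.Chars.join ['\n'] lines) (pvBf acc) inside =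
      (((lines.map String.ofList).dropLast.foldl pvStepB
          (out, acc.map String.ofList, inside)).1 ++
        (if PySem.Str.join "\n"
              (((lines.map String.ofList).dropLast.foldl pvStepB
                  (out, acc.map String.ofList, inside)).2.1 ++
                [(lines.map String.ofList).getLastD ""]) = ""
         then []
         else [PySem.Str.join "\n"
              (((lines.map String.ofList).dropLast.foldl pvStepB
                  (out, acc.map String.ofList, inside)).2.1 ++
                [(lines.map String.ofList).getLastD ""])])) := by
  intro lines
  induction lines with
  | nil => intro h; exact absurd rfl h
  | cons l rest ih =>
    intro _ hnl out acc inside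
    cases rest with
    | nil =>
      have hdl : ∀ (x : String), ([x]).dropLast = ([] : List String) := fun _ => rfl
      have hs := pvScanA_noNL l.length l (le_refl _) (hnl l (List.mem_cons_self ..)) (pvBf acc) inside
      by_cases hc : pvBf acc ++ l = []
      · simp [PySem.Chars.join_singleton, hs, hc, pvJoinStr, hdl]
      · simp [PySem.Chars.join_singleton, hs, hc, pvJoinStr, String.ofList_eq_empty_iff,
          List.isEmpty_iff, hdl]
        intro h1 h2
        exact hc (by simp [h1, h2])
    | cons r rs =>
      have hrest : ∀ p ∈ (r :: rs), '\n' ∉ p := fun p hp => hnl p (List.mem_cons_of_mem _ hp)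
      have hl : '\n' ∉ l := hnl l (List.mem_cons_self ..)
      rw [PySem.Chars.join_cons_cons]
      rw [show l ++ ['\n'] ++ PySem.Chars.join ['\n'] (r :: rs) =
        l ++ '\n' :: PySem.Chars.join ['\n'] (r :: rs) by simp]
      rw [pvScanA_line l.length l (le_refl _) hl]
      have hmapne : (r :: rs).map String.ofList ≠ [] := by simp
      have hdrop : ((l :: r :: rs).map String.ofList).dropLast =
          String.ofList l :: ((r :: rs).map String.ofList).dropLast := by
        simp
      have hlast : ((l :: r :: rs).map String.ofList).getLastD "" =
          ((r :: rs).map String.ofList).getLastD "" := by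
        simp only [List.map_cons]
        exact pvGetLastD_cons _ _ _ (by simp)
      rw [hdrop, hlast, List.foldl_cons]
      by_cases hcond : (if pvGcnt l % 2 = 1 then !inside else inside) = true
      · have hstep : pvStepB (out, acc.map String.ofList, inside) (String.ofList l) =
            (out, acc.map String.ofList ++ [String.ofList l], true) := by
          rw [pvStepB]
          simp only [pvFlip_ofList, hcond]
          simp
        rw [if_pos hcond, hstep]
        have := ih (by simp) hrest out (acc ++ [l]) true
        rw [pvBf_snoc] at this
        simpa [List.map_append] using this
      · have hcond' : (if pvGcnt l % 2 = 1 then !inside else inside) = false := by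
          simpa using hcond
        have hstep : pvStepB (out, acc.map String.ofList, inside) (String.ofList l) =
            (out ++ [String.ofList (pvBf acc ++ l)], [], false) := by
          rw [pvStepB]
          simp only [pvFlip_ofList, hcond', pvJoinStr]
          simp
        rw [if_neg (by simp [hcond']), hstep]
        have := ih (by simp) hrest (out ++ [String.ofList (pvBf acc ++ l)]) [] false
        rw [show pvBf [] = ([] : List Char) from rfl] at this
        simp only [List.map_nil] at this
        rw [← this]
        simp

-- ===== VERDICT (by name: the statement is the Claim_ definition above) =====
theorem split_into_logical_lines_py_spec : Claim_equal_split_into_logical_lines_py := by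
  intro s _ _
  unfold Spec_split_into_logical_lines_py
  have hsplit : PySem.Str.split? s "\n" = some ((pvSplit s.toList).map String.ofList) := by
    simp [PySem.Str.split?, PySem.Chars.split?, pvSplitOn_eq]
  have hmain := pvMain (pvSplit s.toList) (pvSplit_ne_nil _) (pvSplit_no_newline _) [] [] false
  rw [pvJoin_pvSplit] at hmain
  rw [show pvBf [] = ([] : List Char) from rfl] at hmain
  simp only [List.map_nil, List.nil_append] at hmain
  rw [split_into_logical_lines_py, split_into_logical_lines_py_alt]
  simp only [hsplit, Option.getD_some]
  exact hmain
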